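-- pv_equiv track=rewrite | github.com/YT-AleX-1337/MMS | mms.py | increase_column
-- ===== SOURCE A (Python) =====
-- def increase_column(c, inc):
--     if inc < 1:
--         return col
--     col = c.copy()
--     while len(col) > 0 and col[-1] < inc:
--         col.pop()
--     col.append(inc)
--     return col
-- ===== SOURCE B (Python) =====
-- def increase_column(c, inc):
--     # One forward pass: k = index just past the last element not below inc;
--     # everything after it is the trailing run of values < inc that A pops.
--     k = 0
--     for i, x in enumerate(c):
--         if not (x < inc):
--             k = i + 1
--     return c[:k] + [inc]
-- ===== Notes on version B (the rewrite author's own statement) =====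
-- stated objective: alternative
-- what changed: B replaces A's copy-then-pop-from-the-end while loop with a single non-mutating forward pass that records the last position not below inc and returns c[:k] + [inc].
import Mathlib
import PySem

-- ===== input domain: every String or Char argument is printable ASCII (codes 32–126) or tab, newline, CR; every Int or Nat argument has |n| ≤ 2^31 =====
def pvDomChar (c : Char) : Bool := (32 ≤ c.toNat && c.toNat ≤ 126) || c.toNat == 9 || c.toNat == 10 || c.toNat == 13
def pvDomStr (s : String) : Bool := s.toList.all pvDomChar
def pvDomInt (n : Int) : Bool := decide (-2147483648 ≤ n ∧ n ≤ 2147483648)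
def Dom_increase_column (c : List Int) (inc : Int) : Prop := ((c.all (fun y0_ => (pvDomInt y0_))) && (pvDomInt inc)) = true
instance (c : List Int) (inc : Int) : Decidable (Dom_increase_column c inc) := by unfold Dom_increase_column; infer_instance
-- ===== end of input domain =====

-- B replaces A's copy-then-pop-from-the-end while loop with a single non-mutating
-- forward pass recording the last position not below inc; same cost, no mutation.

-- ===== PORT A =====
-- while len(col) > 0 and col[-1] < inc: col.pop()
def increase_column_pop (col : List Int) (inc : Int) : List Int :=
  if 0 < col.length ∧ (col.getLast?.getD 0) < inc then
    increase_column_pop col.dropLast inc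
  else col
termination_by col.length
decreasing_by simp_all [List.length_dropLast]

def increase_column (c : List Int) (inc : Int) : List Int :=
  if inc < 1 then
    []  -- Python: `return col` with `col` undefined → NameError; excluded by Pre_
  else
    increase_column_pop c inc ++ [inc]

-- ===== PORT B =====
-- for i, x in enumerate(c): if not (x < inc): k = i + 1   (state = (i, k))
def increase_column_alt (c : List Int) (inc : Int) : List Int :=
  let k := (c.foldl (fun (p : Nat × Nat) x =>
              (p.1 + 1, if ¬ (x < inc) then p.1 + 1 else p.2)) (0, 0)).2
  c.take k ++ [inc]

-- ===== PRECONDITION & SPEC =====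
-- Pre_ excludes inc < 1, on which A raises NameError (`return col`, col undefined).
def Pre_increase_column (c : List Int) (inc : Int) : Prop := 1 ≤ inc
instance (c : List Int) (inc : Int) : Decidable (Pre_increase_column c inc) := by
  unfold Pre_increase_column; infer_instance

def pvWitness_increase_column : List Int × Int := ([3, 1, 2], 2)

def Spec_increase_column (c : List Int) (inc : Int) (out : List Int) : Prop := out = increase_column_alt c inc
instance (c : List Int) (inc : Int) (out : List Int) : Decidable (Spec_increase_column c inc out) := by unfold Spec_increase_column; infer_instance

-- ===== CLAIM (what is proved, stated in full; the proofs are below) =====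
def Claim_equal_increase_column : Prop := ∀ (c : List Int) (inc : Int), Dom_increase_column c inc → Pre_increase_column c inc → Spec_increase_column c inc (increase_column c inc)

-- ===== LEMMAS AND PROOFS =====

-- A's pop loop strips the trailing run of elements < inc.
theorem pop_eq_dropWhile_rev (inc : Int) : ∀ (c : List Int),
    increase_column_pop c inc = (c.reverse.dropWhile (fun x => decide (x < inc))).reverse := by
  intro c
  induction c using List.reverseRecOn with
  | nil => rw [increase_column_pop.eq_def]; simp
  | append_singleton c a ih =>
      rw [increase_column_pop.eq_def]
      by_cases h : a < inc
      · simp [h, ih]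
      · simp [h]

-- B's fold: second component = length of the trailing-stripped reverse (or k0 if empty).
theorem fold_snd_eq (inc : Int) : ∀ (c : List Int) (i k0 : Nat),
    (c.foldl (fun (p : Nat × Nat) x =>
        (p.1 + 1, if ¬ (x < inc) then p.1 + 1 else p.2)) (i, k0))
      = (i + c.length,
         if (c.reverse.dropWhile (fun x => decide (x < inc))) = [] then k0
         else i + (c.reverse.dropWhile (fun x => decide (x < inc))).length) := by
  intro c
  induction c using List.reverseRecOn with
  | nil => intro i k0; simp
  | append_singleton c a ih =>
      intro i k0
      rw [List.foldl_append, ih]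
      have hrev : (c ++ [a]).reverse = a :: c.reverse := by simp
      rw [hrev, List.dropWhile_cons]
      by_cases h : a < inc
      · simp [h, not_le.mpr h]
        omega
      · have h' : inc ≤ a := not_lt.mp h
        simp [h, h']
        omega

theorem take_drop_rev (inc : Int) (c : List Int) :
    c.take ((c.reverse.dropWhile (fun x => decide (x < inc))).length)
      = (c.reverse.dropWhile (fun x => decide (x < inc))).reverse := by
  have hsplit := List.takeWhile_append_dropWhile
    (p := fun x => decide (x < inc)) (l := c.reverse)
  have hc : (c.reverse.dropWhile (fun x => decide (x < inc))).reverse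
      ++ (c.reverse.takeWhile (fun x => decide (x < inc))).reverse = c := by
    rw [← List.reverse_append, hsplit, List.reverse_reverse]
  generalize hD : c.reverse.dropWhile (fun x => decide (x < inc)) = D at hc ⊢
  generalize hT : c.reverse.takeWhile (fun x => decide (x < inc)) = T at hc
  rw [← hc, ← List.length_reverse (as := D)]
  exact List.take_left

-- ===== VERDICT (by name: the statement is the Claim_ definition above) =====
theorem increase_column_spec : Claim_equal_increase_column := by
  intro c inc _ hpre
  unfold Spec_increase_column increase_column increase_column_alt
  have hinc : ¬ inc < 1 := not_lt.mpr hpre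
  simp only [hinc, if_false]
  rw [pop_eq_dropWhile_rev, fold_snd_eq]
  by_cases h : (c.reverse.dropWhile (fun x => decide (x < inc))) = []
  · simp [h]
  · simp only [h, if_false, Nat.zero_add]
    rw [take_drop_rev]
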